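-- pv_equiv track=rewrite | github.com/guglielmogattiglio/py_submit_plat | EvalException.py | get_n_line
-- ===== SOURCE A (Python) =====
-- def get_n_line(s, n):
--     c = 0
--     start = -1
--     for i in range(len(s)):
--         if s[i] == '\n':
--             c += 1
--             if c == n:
--                 start = i
--             if c == n + 1:
--                 return s[start:i]
-- ===== SOURCE B (Python) =====
-- def get_n_line(s, n):
--     positions = [-1] + [i for i, ch in enumerate(s) if ch == '\n']
--     if 0 <= n and n + 1 < len(positions):
--         return s[positions[n]:positions[n + 1]]
--     return None
-- ===== Notes on version B (the rewrite author's own statement) =====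
-- stated objective: alternative
-- what changed: Replaces A's single early-exiting counting scan (counter + running start index) with building the full table of newline positions (with a -1 sentinel) and then slicing between table entries n and n+1.
import Mathlib
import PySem

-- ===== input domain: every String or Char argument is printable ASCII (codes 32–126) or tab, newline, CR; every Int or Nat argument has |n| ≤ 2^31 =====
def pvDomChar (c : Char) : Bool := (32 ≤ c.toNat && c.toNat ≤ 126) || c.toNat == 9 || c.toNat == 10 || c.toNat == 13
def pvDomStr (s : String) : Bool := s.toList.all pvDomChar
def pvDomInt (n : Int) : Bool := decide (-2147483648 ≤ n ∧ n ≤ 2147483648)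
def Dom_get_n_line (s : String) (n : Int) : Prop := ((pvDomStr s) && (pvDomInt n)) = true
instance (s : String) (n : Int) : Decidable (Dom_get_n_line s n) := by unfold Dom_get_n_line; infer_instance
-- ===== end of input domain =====

-- B replaces A's early-exiting counting scan by a table of newline positions built in one pass,
-- then a slice between table entries n and n+1 (alternative decomposition, same cost).

-- ===== PORT A =====
-- the 'for i in range(len(s))' loop: structural recursion on the remaining characters,
-- carrying the index i and A's counters c and start; early 'return' = stop with some
def getNLineLoop (s : String) (n : Int) : List Char → Int → Int → Int → Option String
  | [], _, _, _ => none
  | ch :: rest, i, c, start =>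
    if ch = '\n' then
      let c' := c + 1
      let start' := if c' = n then i else start
      if c' = n + 1 then some (PySem.Str.slice s (some start') (some i))
      else getNLineLoop s n rest (i + 1) c' start'
    else getNLineLoop s n rest (i + 1) c start

def get_n_line (s : String) (n : Int) : Option String :=
  getNLineLoop s n s.toList 0 0 (-1)

-- ===== PORT B =====
def get_n_line_alt (s : String) (n : Int) : Option String :=
  let positions : List Int :=
    -1 :: (PySem.List.enumerate s.toList).filterMap
            (fun p => if p.2 = '\n' then some p.1 else none)
  if 0 ≤ n ∧ n + 1 < (positions.length : Int) then
    some (PySem.Str.slice s (some (PySem.List.pyGetD positions n 0))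
                            (some (PySem.List.pyGetD positions (n + 1) 0)))
  else none

-- ===== PRECONDITION & SPEC =====
def Spec_get_n_line (s : String) (n : Int) (out : Option String) : Prop := out = get_n_line_alt s n
instance (s : String) (n : Int) (out : Option String) : Decidable (Spec_get_n_line s n out) := by unfold Spec_get_n_line; infer_instance

-- ===== CLAIM (what is proved, stated in full; the proofs are below) =====
def Claim_equal_get_n_line : Prop := ∀ (s : String) (n : Int), Dom_get_n_line s n → Spec_get_n_line s n (get_n_line s n)

-- ===== LEMMAS AND PROOFS =====

-- the newline positions of cs, the first character having index i
def nlPos (i : Int) : List Char → List Int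
  | [] => []
  | ch :: rest => if ch = '\n' then i :: nlPos (i + 1) rest else nlPos (i + 1) rest

lemma filterMap_enumerate_eq_nlPos (cs : List Char) (i : Int) :
    (PySem.List.enumerate cs i).filterMap
      (fun p => if p.2 = '\n' then some p.1 else none) = nlPos i cs := by
  induction cs generalizing i with
  | nil => simp [PySem.List.enumerate_nil, nlPos]
  | cons ch rest ih =>
    rw [PySem.List.enumerate_cons]
    by_cases h : ch = '\n' <;> simp [nlPos, h, ih]

-- invariant of A's loop: it returns exactly the slice between the (n-c)th and (n-c+1)th
-- newline of the remaining characters (start standing in when n = c), none if too few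
lemma getNLineLoop_spec (s : String) (n : Int) (cs : List Char) (i c start : Int) :
    getNLineLoop s n cs i c start =
      if 0 ≤ n - c ∧ (n - c).toNat + 1 ≤ (nlPos i cs).length then
        some (PySem.Str.slice s
          (some (if n = c then start else (nlPos i cs).getD ((n - c).toNat - 1) 0))
          (some ((nlPos i cs).getD (n - c).toNat 0)))
      else none := by
  induction cs generalizing i c start with
  | nil => simp [getNLineLoop, nlPos]
  | cons ch rest ih =>
    by_cases h : ch = '
'
    · have hnl : nlPos i (ch :: rest) = i :: nlPos (i + 1) rest := by simp [nlPos, h]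
      rw [hnl]
      simp only [getNLineLoop, h, if_true]
      by_cases hc : c + 1 = n + 1
      · have hcn : c = n := by omega
        have hne : ¬ (c + 1 = n) := by omega
        simp [hcn, List.getD]
      · have hcn : ¬ (n = c) := by omega
        rw [if_neg hc, ih]
        by_cases hcond : 0 ≤ n - (c + 1) ∧ (n - (c + 1)).toNat + 1 ≤ (nlPos (i + 1) rest).length
        · have htn : (n - c).toNat = (n - (c + 1)).toNat + 1 := by omega
          rw [if_pos hcond,
              if_pos (show 0 ≤ n - c ∧ (n - c).toNat + 1 ≤ (i :: nlPos (i + 1) rest).length by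
                simp only [List.length_cons]; omega)]
          have hend : ((i :: nlPos (i + 1) rest).getD (n - c).toNat 0)
              = (nlPos (i + 1) rest).getD (n - (c + 1)).toNat 0 := by
            rw [htn]; simp
          rw [hend, if_neg hcn]
          by_cases h1 : n = c + 1
          · subst h1
            have h0 : (c + 1 - c).toNat - 1 = 0 := by omega
            rw [if_pos rfl, if_pos rfl, h0]
            simp [List.getD]
          · have htn2 : (n - c).toNat - 1 = ((n - (c + 1)).toNat - 1) + 1 := by omega
            rw [if_neg h1, htn2]
            simp
        · rw [if_neg hcond,
              if_neg (show ¬ (0 ≤ n - c ∧ (n - c).toNat + 1 ≤ (i :: nlPos (i + 1) rest).length) by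
                simp only [List.length_cons]; omega)]
    · have hnl : nlPos i (ch :: rest) = nlPos (i + 1) rest := by simp [nlPos, h]
      rw [hnl]
      simp only [getNLineLoop, h, if_false]
      exact ih (i + 1) c start

lemma pyGetD_cons_neg_one (ps : List Int) (n : Int) (hn : 0 ≤ n) :
    PySem.List.pyGetD (-1 :: ps) n 0
      = if n = 0 then -1 else ps.getD (n.toNat - 1) 0 := by
  rw [PySem.List.pyGetD_of_nonneg _ _ hn]
  by_cases h : n = 0
  · simp [h, List.getD]
  · have : n.toNat = (n.toNat - 1) + 1 := by omega
    rw [this]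
    simp [h]

-- ===== VERDICT (by name: the statement is the Claim_ definition above) =====
theorem get_n_line_spec : Claim_equal_get_n_line := by
  intro s n _
  show get_n_line s n = get_n_line_alt s n
  unfold get_n_line get_n_line_alt
  rw [getNLineLoop_spec, filterMap_enumerate_eq_nlPos]
  set ps := nlPos 0 s.toList with hps
  by_cases hc : 0 ≤ n - 0 ∧ (n - 0).toNat + 1 ≤ ps.length
  · have hc' : 0 ≤ n ∧ n + 1 < (((-1 :: ps).length : Nat) : Int) := by
      simp only [List.length_cons]
      push_cast
      omega
    rw [if_pos hc, if_pos hc']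
    have hn : 0 ≤ n := by omega
    rw [pyGetD_cons_neg_one ps n hn, pyGetD_cons_neg_one ps (n + 1) (by omega)]
    have h1 : ¬ (n + 1 = 0) := by omega
    have h2 : (n + 1).toNat - 1 = (n - 0).toNat := by omega
    by_cases h0 : n = 0
    · simp [h0]
    · have h3 : ¬ (n = 0) := h0
      simp only [sub_zero] at *
      simp [h3, h1, h2]
  · rw [if_neg hc, if_neg (by simp only [List.length_cons]; push_cast; omega)]
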